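-- pv_equiv track=rewrite | github.com/siimveske/AOC | 2016/day4/day04_security_through_obscurity.py | filter_rooms
-- ===== SOURCE A (Python) =====
-- from collections import Counter
--
-- def filter_rooms(rooms):
--     filtered_rooms = []
--
--     for name, room_id, room_hash in rooms:
--         letters = "".join(name)
--         letter_counts = Counter(letters)
--         sorted_letters = sorted(letter_counts.items(), key=lambda x: (-x[1], x[0]))
--         key = "".join(letter for letter, _ in sorted_letters[:5])
--
--         if key == room_hash:
--             filtered_rooms.append((name, room_id, room_hash))
--
--     return filtered_rooms
-- ===== SOURCE B (Python) =====
-- def filter_rooms(rooms):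
--     # selection instead of sorting: repeatedly extract the best remaining
--     # letter (highest count, alphabetical tie-break) up to five times
--     result = []
--     for room in rooms:
--         name, _, room_hash = room
--         counts = {}
--         for ch in "".join(name):
--             counts[ch] = counts.get(ch, 0) + 1
--         pool = list(counts.items())
--         key = []
--         while pool and len(key) < 5:
--             best = min(pool, key=lambda p: (-p[1], p[0]))
--             key.append(best[0])
--             pool = [p for p in pool if p != best]
--         if "".join(key) == room_hash:
--             result.append(room)
--     return result
-- ===== Notes on version B (the rewrite author's own statement) =====
-- stated objective: alternative
-- what changed: A sorts all Counter items by the tuple key (-count, letter) and slices the first five; B never sorts: it runs at most five rounds of selection, each taking min() of the remaining (letter,count) pairs under the same key and removing it from the pool.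
import Mathlib
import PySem

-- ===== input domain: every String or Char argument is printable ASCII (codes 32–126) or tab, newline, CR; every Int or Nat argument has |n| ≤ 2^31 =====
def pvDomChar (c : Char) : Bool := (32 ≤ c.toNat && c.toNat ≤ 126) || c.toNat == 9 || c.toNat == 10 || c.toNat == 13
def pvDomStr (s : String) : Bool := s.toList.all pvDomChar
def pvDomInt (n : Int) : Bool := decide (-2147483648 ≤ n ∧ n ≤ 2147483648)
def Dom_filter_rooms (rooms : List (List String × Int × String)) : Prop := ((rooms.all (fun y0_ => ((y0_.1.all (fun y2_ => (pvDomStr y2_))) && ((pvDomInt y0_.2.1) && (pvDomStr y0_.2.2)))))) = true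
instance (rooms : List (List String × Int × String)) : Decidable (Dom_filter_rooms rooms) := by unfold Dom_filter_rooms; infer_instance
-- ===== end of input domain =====

-- B computes each room's checksum by SELECTION — up to five rounds of extracting the minimum
-- remaining (−count, letter) pair — instead of A's full sort of the Counter items; same results.

-- ===== PORT A =====
def filter_rooms (rooms : List (List String × Int × String)) : List (List String × Int × String) :=
  rooms.foldl (fun filtered_rooms room =>
    let letters := PySem.Str.join "" room.1
    let letter_counts := PySem.Dict.counter letters.toList
    let sorted_letters := PySem.List.sorted2 letter_counts.items (fun x => -x.2) (fun x => x.1)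
    let key := (sorted_letters.take 5).map (fun p => p.1)
    if key == room.2.2.toList then filtered_rooms ++ [room] else filtered_rooms) []

-- ===== PORT B =====
-- B's while-loop: 'while pool and len(key) < 5' with at most 5 appends; the fuel is the
-- remaining capacity 5 - len(key).  min2? returns none exactly when pool is empty (loop exit).
def pvSelect : Nat → List (Char × Int) → List Char
  | 0, _ => []
  | n + 1, pool =>
    match PySem.List.min2? pool (fun p => -p.2) (fun p => p.1) with
    | none => []
    | some best => best.1 :: pvSelect n (pool.filter (fun p => !(p == best)))

def pvChecksumB (letters : List Char) : List Char :=
  let counts := letters.foldl (fun d c => d.insert c (d.getD c 0 + 1))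
    (PySem.Dict.empty : PySem.Dict Char Int)
  pvSelect 5 counts.items

def filter_rooms_alt (rooms : List (List String × Int × String)) : List (List String × Int × String) :=
  rooms.foldl (fun result room =>
    if pvChecksumB (PySem.Str.join "" room.1).toList == room.2.2.toList then result ++ [room]
    else result) []

-- ===== PRECONDITION & SPEC =====
def Spec_filter_rooms (rooms : List (List String × Int × String)) (out : List (List String × Int × String)) : Prop := out = filter_rooms_alt rooms
instance (rooms : List (List String × Int × String)) (out : List (List String × Int × String)) : Decidable (Spec_filter_rooms rooms out) := by unfold Spec_filter_rooms; infer_instance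

-- ===== CLAIM (what is proved, stated in full; the proofs are below) =====
def Claim_equal_filter_rooms : Prop := ∀ (rooms : List (List String × Int × String)), Dom_filter_rooms rooms → Spec_filter_rooms rooms (filter_rooms rooms)

-- ===== LEMMAS AND PROOFS =====

-- an Int encoding of Python's tuple key (-count, letter): lexicographic because char codes are < 1114112
def pvKey (p : Char × Int) : Int := -p.2 * 1114112 + (p.1.toNat : Int)

lemma pvChar_lt (c : Char) : c.toNat < 1114112 := by
  rcases c.valid with h | h
  · simp only [Char.toNat]; omega
  · simp only [Char.toNat]; omega

lemma pvKey_inj (a b : Char × Int) (h : pvKey a = pvKey b) : a = b := by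
  have ha := pvChar_lt a.1
  have hb := pvChar_lt b.1
  unfold pvKey at h
  have h1 : a.1.toNat = b.1.toNat := by omega
  have h2 : a.2 = b.2 := by omega
  have h3 : a.1 = b.1 := by
    rw [← Char.ofNat_toNat a.1, ← Char.ofNat_toNat b.1, h1]
  cases a; cases b; simp_all

lemma pvLex_iff (a b : Char × Int) :
    (-a.2 < -b.2 ∨ (¬(-b.2 < -a.2) ∧ a.1 < b.1)) ↔ pvKey a < pvKey b := by
  have ha := pvChar_lt a.1
  have hb := pvChar_lt b.1
  have hc : a.1 < b.1 ↔ (a.1.toNat : Int) < (b.1.toNat : Int) := by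
    rw [Char.lt_def, UInt32.lt_iff_toNat_lt, Char.toNat, Char.toNat]
    exact_mod_cast Iff.rfl
  unfold pvKey
  rw [hc]
  omega

lemma pvBefore_eq (a b : Char × Int) :
    (decide ((fun x : Char × Int => -x.2) a < (fun x : Char × Int => -x.2) b) ||
      (!decide ((fun x : Char × Int => -x.2) b < (fun x : Char × Int => -x.2) a) &&
        decide ((fun x : Char × Int => x.1) a < (fun x : Char × Int => x.1) b)))
      = decide (pvKey a < pvKey b) := by
  have h : decide (-a.2 < -b.2 ∨ (¬(-b.2 < -a.2) ∧ a.1 < b.1)) = decide (pvKey a < pvKey b) :=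
    decide_eq_decide.mpr (pvLex_iff a b)
  simpa [Bool.decide_or, Bool.decide_and, ← decide_not, not_lt] using h

-- A's tuple-keyed sort is the sort by the single Int key pvKey
lemma pvSorted2_eq (xs : List (Char × Int)) :
    PySem.List.sorted2 xs (fun x => -x.2) (fun x => x.1) = PySem.List.sorted xs pvKey := by
  rw [PySem.List.sorted_eq_foldl_insertBy]
  unfold PySem.List.sorted2
  simp only [if_neg (by decide : ¬ (false = true))]
  congr 1
  funext acc x
  congr 1
  funext a b
  exact pvBefore_eq a b

-- B's tuple-keyed min is the min by pvKey
lemma pvMin2_eq (xs : List (Char × Int)) :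
    PySem.List.min2? xs (fun p => -p.2) (fun p => p.1) = PySem.List.min? xs pvKey := by
  unfold PySem.List.min2? PySem.List.min?
  congr 1
  funext acc x
  cases acc with
  | none => rfl
  | some m =>
      simp only [pvBefore_eq x m]
      by_cases h : pvKey x < pvKey m <;> simp [h]

-- extracting the first minimum peels the head off the sorted list
lemma pvSorted_cons_min (pool : List (Char × Int)) (m : Char × Int)
    (hnd : pool.Nodup) (hm : PySem.List.min? pool pvKey = some m) :
    PySem.List.sorted pool pvKey
      = m :: PySem.List.sorted (pool.filter (fun p => !(p == m))) pvKey := by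
  have hmem := PySem.List.min?_mem hm
  have hmin := PySem.List.min?_isMin hm
  have hfilt : pool.filter (fun p => !(p == m)) = pool.erase m := by
    rw [List.Nodup.erase_eq_filter hnd m]
    rfl
  apply PySem.List.sorted_eq_of_perm_of_pairwise_lt
  · -- permutation
    refine List.Perm.trans ?_ (List.perm_cons_erase hmem).symm
    exact List.Perm.cons m (by rw [hfilt] at *; exact PySem.List.sorted_perm _ _ _)
  · -- pairwise strict increase in pvKey
    rw [List.pairwise_cons]
    constructor
    · intro y hy
      have hy' : y ∈ pool.filter (fun p => !(p == m)) :=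
        (PySem.List.mem_sorted _ _ _ _).mp hy
      have hyp := List.mem_filter.mp hy'
      have hne : y ≠ m := by
        intro hEq
        simp [hEq] at hyp
      have hle := hmin y hyp.1
      rcases lt_or_eq_of_le hle with h | h
      · exact h
      · exact absurd (pvKey_inj m y h) (Ne.symm hne)
    · have hsub : (pool.filter (fun p => !(p == m))).Nodup := List.Nodup.filter _ hnd
      have hsnd : (PySem.List.sorted (pool.filter (fun p => !(p == m))) pvKey).Nodup :=
        (PySem.List.sorted_perm _ _ _).symm.nodup hsub
      have hle := PySem.List.sorted_pairwise (pool.filter (fun p => !(p == m))) pvKey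
      exact hle.imp₂ (fun a b hab hne => lt_of_le_of_ne hab (fun h => hne (pvKey_inj a b h))) hsnd

-- the selection loop IS take-n of the sorted list, projected to letters
lemma pvSelect_eq (n : Nat) (pool : List (Char × Int)) (hnd : pool.Nodup) :
    pvSelect n pool = ((PySem.List.sorted pool pvKey).take n).map (fun p => p.1) := by
  induction n generalizing pool with
  | zero => simp [pvSelect]
  | succ n ih =>
      rw [pvSelect, pvMin2_eq]
      cases hm : PySem.List.min? pool pvKey with
      | none =>
          have : pool = [] := (PySem.List.min?_eq_none_iff _ _).mp hm
          subst this
          simp [PySem.List.sorted]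
      | some m =>
          rw [pvSorted_cons_min pool m hnd hm, List.take_succ_cons, List.map_cons]
          exact congrArg _ (ih _ (List.Nodup.filter _ hnd))

-- letter keys of a Counter are distinct, hence the item pairs are distinct
lemma pvItems_nodup (cs : List Char) : (PySem.Dict.counter cs).items.Nodup := by
  apply List.Nodup.of_map Prod.fst
  rw [PySem.Dict.items_counter, List.map_map]
  have h : (Prod.fst ∘ fun k : Char => (k, (List.count k cs : Int))) = fun k => k := rfl
  rw [h, List.map_id']
  exact PySem.Set.nodup_ofList cs

-- the central fact: B's five selections are A's sorted list of pairs, truncated and projected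
lemma pvChecksum_eq (cs : List Char) :
    pvChecksumB cs
      = ((PySem.List.sorted2 (PySem.Dict.counter cs).items (fun x => -x.2) (fun x => x.1)).take 5).map
          (fun p => p.1) := by
  have h0 : pvChecksumB cs
      = pvSelect 5 ((cs.foldl (fun d c => d.insert c (d.getD c 0 + 1))
          (PySem.Dict.empty : PySem.Dict Char Int)).items) := rfl
  rw [h0, PySem.Dict.foldl_insert_getD_add_one_eq_counter, pvSorted2_eq,
    pvSelect_eq 5 _ (pvItems_nodup cs)]

lemma pvBody_eq (acc : List (List String × Int × String)) (room : List String × Int × String) :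
    (if ((PySem.List.sorted2 (PySem.Dict.counter (PySem.Str.join "" room.1).toList).items
            (fun x => -x.2) (fun x => x.1)).take 5).map (fun p => p.1) == room.2.2.toList
      then acc ++ [room] else acc)
    = (if pvChecksumB (PySem.Str.join "" room.1).toList == room.2.2.toList
      then acc ++ [room] else acc) := by
  rw [pvChecksum_eq]

-- ===== VERDICT (by name: the statement is the Claim_ definition above) =====
theorem filter_rooms_spec : Claim_equal_filter_rooms := by
  intro rooms _
  show filter_rooms rooms = filter_rooms_alt rooms
  unfold filter_rooms filter_rooms_alt
  exact PySem.List.foldl_congr_mem _ _ _ _ (fun acc room _ => pvBody_eq acc room)
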